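-- pv_equiv track=rewrite | github.com/joshgraves3/Song-Generator | SongGenerator.py | formatSong
-- ===== SOURCE A (Python) =====
-- def formatSong(song):
--
-- 	wordCount = 0
-- 	stanzaCount = 0
-- 	listVersion = song.split(' ')
-- 	returnSong = ""
-- 	for item in listVersion:
-- 		returnSong += item
-- 		returnSong += " "
-- 		wordCount += 1
-- 		if wordCount % 4 == 0:
-- 			returnSong += "\n"
-- 		if wordCount % 16 == 0:
-- 			returnSong += "\n\n"
--
-- 	return returnSong
-- ===== SOURCE B (Python) =====
-- def formatSong(song):
--     words = song.split(' ')
--     result = ""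
--     for i in range(0, len(words), 16):
--         stanza = words[i:i + 16]
--         for j in range(0, len(stanza), 4):
--             line = stanza[j:j + 4]
--             result += ''.join(w + ' ' for w in line)
--             if len(line) == 4:
--                 result += '\n'
--         if len(stanza) == 16:
--             result += '\n\n'
--     return result
-- ===== Notes on version B (the rewrite author's own statement) =====
-- stated objective: alternative
-- what changed: Replaces A's single word loop with modular counters (wordCount % 4 / % 16) by explicit chunking: the word list is grouped into stanzas of 16 and lines of 4, each line rendered by a join and newlines emitted only after full groups.
import Mathlib
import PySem

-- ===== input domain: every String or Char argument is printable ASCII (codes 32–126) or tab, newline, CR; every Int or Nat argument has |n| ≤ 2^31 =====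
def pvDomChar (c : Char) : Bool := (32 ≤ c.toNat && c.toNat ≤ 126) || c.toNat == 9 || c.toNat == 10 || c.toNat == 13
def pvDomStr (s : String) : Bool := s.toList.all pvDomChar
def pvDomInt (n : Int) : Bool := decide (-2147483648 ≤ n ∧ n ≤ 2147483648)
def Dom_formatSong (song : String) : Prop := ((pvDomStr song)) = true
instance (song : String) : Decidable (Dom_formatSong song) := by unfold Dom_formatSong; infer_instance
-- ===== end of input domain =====

-- B re-decomposes A's counter-driven word loop into explicit chunking (stanzas of 16, lines of 4); same output, no speed claim.

-- ===== PORT A =====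
-- the for-loop of A over the word list, state = (returnSong, wordCount); stanzaCount is dead in A and dropped
def aLoop : List String → String → Int → String
  | [], returnSong, _ => returnSong
  | item :: rest, returnSong, wordCount =>
      let acc1 := returnSong ++ item ++ " "
      let wc1 := wordCount + 1
      let acc2 := if wc1 % 4 = 0 then acc1 ++ "\n" else acc1
      let acc3 := if wc1 % 16 = 0 then acc2 ++ "\n\n" else acc2
      aLoop rest acc3 wc1

def formatSong (song : String) : String :=
  aLoop ((PySem.Str.split? song " ").getD []) "" 0

-- ===== PORT B =====
-- ''.join(w + ' ' for w in line)
def joinLine (line : List String) : String :=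
  (line.map (fun w => w ++ " ")).foldl (· ++ ·) ""

-- inner loop: for j in range(0, len(stanza), 4): line = stanza[j:j+4] …
def stanzaLoop (stanza : List String) (result : String) : String :=
  match stanza with
  | [] => result
  | x :: t =>
      let line := (x :: t).take 4
      let r1 := result ++ joinLine line
      let r2 := if line.length = 4 then r1 ++ "\n" else r1
      stanzaLoop ((x :: t).drop 4) r2
termination_by stanza.length
decreasing_by simp

-- outer loop: for i in range(0, len(words), 16): stanza = words[i:i+16] …
def songLoop (ws : List String) (result : String) : String :=
  match ws with
  | [] => result
  | x :: t =>
      let stanza := (x :: t).take 16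
      let r1 := stanzaLoop stanza result
      let r2 := if stanza.length = 16 then r1 ++ "\n\n" else r1
      songLoop ((x :: t).drop 16) r2
termination_by ws.length
decreasing_by simp

def formatSong_alt (song : String) : String :=
  songLoop ((PySem.Str.split? song " ").getD []) ""

-- ===== PRECONDITION & SPEC =====
def Spec_formatSong (song : String) (out : String) : Prop := out = formatSong_alt song
instance (song : String) (out : String) : Decidable (Spec_formatSong song out) := by unfold Spec_formatSong; infer_instance

-- ===== CLAIM (what is proved, stated in full; the proofs are below) =====
def Claim_equal_formatSong : Prop := ∀ (song : String), Dom_formatSong song → Spec_formatSong song (formatSong song)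

-- ===== LEMMAS AND PROOFS =====

lemma aLoop_acc (ws : List String) (acc : String) (c : Int) :
    aLoop ws acc c = acc ++ aLoop ws "" c := by
  induction ws generalizing acc c with
  | nil => simp [aLoop]
  | cons x t ih =>
      simp only [aLoop]
      rw [ih]
      conv_rhs => rw [ih]
      split_ifs <;> simp [String.append_assoc]

lemma stanzaLoop_acc (s : List String) (acc : String) :
    stanzaLoop s acc = acc ++ stanzaLoop s "" := by
  induction hn : s.length using Nat.strong_induction_on generalizing s acc with
  | _ n ih =>
    cases s with
    | nil => simp [stanzaLoop]
    | cons x t =>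
        simp only [stanzaLoop]
        rw [ih ((x :: t).drop 4).length (by subst hn; simp only [List.length_drop, List.length_cons]; omega) _ _ rfl]
        conv_rhs => rw [ih ((x :: t).drop 4).length (by subst hn; simp only [List.length_drop, List.length_cons]; omega) _ _ rfl]
        split_ifs <;> simp [String.append_assoc]

lemma songLoop_acc (ws : List String) (acc : String) :
    songLoop ws acc = acc ++ songLoop ws "" := by
  induction hn : ws.length using Nat.strong_induction_on generalizing ws acc with
  | _ n ih =>
    cases ws with
    | nil => simp [songLoop]
    | cons x t =>
        simp only [songLoop]
        rw [stanzaLoop_acc]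
        conv_rhs => rw [stanzaLoop_acc]
        rw [ih ((x :: t).drop 16).length (by subst hn; simp only [List.length_drop, List.length_cons]; omega) _ _ rfl]
        conv_rhs => rw [ih ((x :: t).drop 16).length (by subst hn; simp only [List.length_drop, List.length_cons]; omega) _ _ rfl]
        split_ifs <;> simp [String.append_assoc]

-- one line of A's loop, starting at a 4-aligned counter
lemma lineLemma (ws : List String) (c : Int) (h : c % 4 = 0) :
    aLoop ws "" c =
      joinLine (ws.take 4)
        ++ (if (ws.take 4).length = 4 then "\n" ++ (if (c + 4) % 16 = 0 then "\n\n" else "") else "")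
        ++ aLoop (ws.drop 4) "" (c + 4) := by
  have n1 : ¬ ((c + 1) % 4 = 0) := by omega
  have n1' : ¬ ((c + 1) % 16 = 0) := by omega
  have n2 : ¬ ((c + 1 + 1) % 4 = 0) := by omega
  have n2' : ¬ ((c + 1 + 1) % 16 = 0) := by omega
  have n3 : ¬ ((c + 1 + 1 + 1) % 4 = 0) := by omega
  have n3' : ¬ ((c + 1 + 1 + 1) % 16 = 0) := by omega
  have e4 : c + 1 + 1 + 1 + 1 = c + 4 := by ring
  have hd4 : (4:Int) ∣ c := by omega
  match ws with
  | [] => simp [aLoop, joinLine]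
  | [a] =>
      simp only [aLoop, if_neg n1, if_neg n1']
      simp [aLoop, joinLine]
  | [a, b] =>
      simp only [aLoop, if_neg n1, if_neg n1', if_neg n2, if_neg n2']
      simp [aLoop, joinLine, String.append_assoc]
  | [a, b, d] =>
      simp only [aLoop, if_neg n1, if_neg n1', if_neg n2, if_neg n2', if_neg n3, if_neg n3']
      simp [aLoop, joinLine, String.append_assoc]
  | a :: b :: d :: e :: rest =>
      simp only [aLoop, if_neg n1, if_neg n1', if_neg n2, if_neg n2', if_neg n3, if_neg n3', e4]
      rw [aLoop_acc]
      by_cases h16 : (c + 4) % 16 = 0 <;>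
        simp [h16, hd4, joinLine, String.append_assoc]

-- one unrolling of B's inner loop (also valid on [])
lemma stanzaLoop_step (s : List String) :
    stanzaLoop s "" =
      joinLine (s.take 4) ++ (if (s.take 4).length = 4 then "\n" else "")
        ++ stanzaLoop (s.drop 4) "" := by
  cases s with
  | nil => simp [stanzaLoop, joinLine]
  | cons x t =>
      simp only [stanzaLoop]
      rw [stanzaLoop_acc]
      split_ifs <;> simp [String.append_assoc]

-- one stanza of A's loop, at a 16-aligned counter, equals one pass of B's outer loop body
lemma stanzaLemma (ws : List String) (c : Int) (h : c % 16 = 0) :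
    aLoop ws "" c =
      stanzaLoop (ws.take 16) ""
        ++ (if (ws.take 16).length = 16 then "\n\n" else "")
        ++ aLoop (ws.drop 16) "" (c + 16) := by
  have q1 : ¬ ((c + 4) % 16 = 0) := by omega
  have q2 : ¬ ((c + 4 + 4) % 16 = 0) := by omega
  have q3 : ¬ ((c + 4 + 4 + 4) % 16 = 0) := by omega
  have e16 : c + 4 + 4 + 4 + 4 = c + 16 := by ring
  have hd16 : (16:Int) ∣ c := by omega
  rw [lineLemma ws c (by omega),
      lineLemma (ws.drop 4) (c + 4) (by omega),
      lineLemma ((ws.drop 4).drop 4) (c + 4 + 4) (by omega),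
      lineLemma (((ws.drop 4).drop 4).drop 4) (c + 4 + 4 + 4) (by omega)]
  rw [stanzaLoop_step (ws.take 16),
      stanzaLoop_step ((ws.take 16).drop 4),
      stanzaLoop_step (((ws.take 16).drop 4).drop 4),
      stanzaLoop_step ((((ws.take 16).drop 4).drop 4).drop 4)]
  simp only [if_neg q1, if_neg q2, if_neg q3, e16]
  simp only [List.drop_drop, List.take_take, List.drop_take, List.length_take,
    List.length_drop]
  by_cases hL : 16 ≤ ws.length
  · have c1 : min 4 ws.length = 4 := by omega
    have c2 : min 4 (ws.length - 4) = 4 := by omega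
    have c3 : min 4 (ws.length - 8) = 4 := by omega
    have c4 : min 4 (ws.length - 12) = 4 := by omega
    have c16 : min 16 ws.length = 16 := by omega
    simp [c1, c2, c3, c4, c16, hd16, stanzaLoop, String.append_assoc]
  · have c4 : ¬ (min 4 (ws.length - 12) = 4) := by omega
    have c16 : ¬ (min 16 ws.length = 16) := by omega
    simp [c4, c16, stanzaLoop, String.append_assoc]

lemma mainLemma (n : Nat) (ws : List String) (c : Int) (hl : ws.length <= n) (h : c % 16 = 0) :
    aLoop ws "" c = songLoop ws "" := by
  induction n generalizing ws c with
  | zero =>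
      have hw : ws = [] := by cases ws <;> simp_all
      subst hw; simp [aLoop, songLoop]
  | succ n ih =>
      cases ws with
      | nil => simp [aLoop, songLoop]
      | cons x t =>
          rw [stanzaLemma _ _ h]
          conv_rhs => simp only [songLoop]
          conv_rhs => rw [stanzaLoop_acc, songLoop_acc]
          rw [ih ((x :: t).drop 16) (c + 16) (by simp only [List.length_drop, List.length_cons] at hl ⊢; omega) (by omega)]
          split_ifs <;> simp [String.append_assoc]

-- ===== VERDICT (by name: the statement is the Claim_ definition above) =====
theorem formatSong_spec : Claim_equal_formatSong := by
  intro song _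
  unfold Spec_formatSong formatSong formatSong_alt
  exact mainLemma ((PySem.Str.split? song " ").getD []).length _ 0 le_rfl rfl
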